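-- pv_equiv track=rewrite | github.com/BenderEg/Bioinformatics | 008 Scew finding.py | find_skew
-- ===== SOURCE A (Python) =====
-- def find_skew(genome):
--     result = [0]
--     count_C = 0
--     count_G = 0
--     for i in range(len(genome)):
--         if genome[i] == 'C':
--             count_C = count_C + 1
--         if genome[i] == 'G':
--             count_G = count_G + 1
--         result.append(count_G - count_C)
--     # result = ' '.join([str(elem) for elem in result])
--     return result
-- ===== SOURCE B (Python) =====
-- def find_skew(genome):
--     # Phase 1: collect only the G/C "events" (position, delta); other characters are irrelevant.
--     events = [(i, 1 if ch == 'G' else -1) for i, ch in enumerate(genome) if ch in ('G', 'C')]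
--     # Phase 2: run-length construction: the skew is constant between events, so emit
--     # each plateau as a repeated block instead of scanning character by character.
--     result = []
--     value = 0
--     prev = 0
--     for i, d in events:
--         result.extend([value] * (i + 1 - prev))
--         value += d
--         prev = i + 1
--     result.extend([value] * (len(genome) + 1 - prev))
--     return result
-- ===== Notes on version B (the rewrite author's own statement) =====
-- stated objective: alternative
-- what changed: Instead of A's per-character two-counter scan appending one value per step, B first extracts only the G/C events (position, +1/-1) and then reconstructs the output by run-length filling: each constant plateau between events is emitted as a repeated block.
import Mathlib
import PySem

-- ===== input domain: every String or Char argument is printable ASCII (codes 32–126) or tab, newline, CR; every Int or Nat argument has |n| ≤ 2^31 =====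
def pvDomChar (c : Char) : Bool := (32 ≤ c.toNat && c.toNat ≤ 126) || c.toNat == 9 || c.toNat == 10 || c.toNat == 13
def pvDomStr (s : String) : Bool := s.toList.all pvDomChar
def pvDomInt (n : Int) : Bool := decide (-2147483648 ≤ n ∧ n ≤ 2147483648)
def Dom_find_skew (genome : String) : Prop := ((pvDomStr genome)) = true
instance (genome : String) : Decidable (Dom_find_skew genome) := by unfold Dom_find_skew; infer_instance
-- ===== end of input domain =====

-- B replaces A's per-character two-counter scan by extracting the G/C events first and
-- then run-length filling the constant plateaus between events; same O(n) cost.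

-- ===== PORT A =====
-- A's loop: state is (result list, count_C, count_G); each character updates the
-- counters and appends count_G - count_C to the result.
def find_skew_step (st : List Int × Int × Int) (c : Char) : List Int × Int × Int :=
  let cC := if c = 'C' then st.2.1 + 1 else st.2.1
  let cG := if c = 'G' then st.2.2 + 1 else st.2.2
  (st.1 ++ [cG - cC], cC, cG)

def find_skew (genome : String) : List Int :=
  (genome.toList.foldl find_skew_step ([0], 0, 0)).1

-- ===== PORT B =====
-- the events comprehension: (index, +1/-1) for each 'G'/'C' character
def find_skew_events (cs : List Char) (start : Int) : List (Int × Int) :=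
  (PySem.List.enumerate cs start).filterMap (fun p =>
    if p.2 = 'G' then some (p.1, 1) else if p.2 = 'C' then some (p.1, -1) else none)

-- the fill loop: state is (result, value, prev); each event emits a plateau block
def find_skew_fill (st : List Int × Int × Int) (e : Int × Int) : List Int × Int × Int :=
  (st.1 ++ List.replicate (e.1 + 1 - st.2.2).toNat st.2.1, st.2.1 + e.2, e.1 + 1)

def find_skew_alt (genome : String) : List Int :=
  let cs := genome.toList
  let st := (find_skew_events cs 0).foldl find_skew_fill ([], 0, 0)
  st.1 ++ List.replicate ((cs.length : Int) + 1 - st.2.2).toNat st.2.1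

-- ===== PRECONDITION & SPEC =====
def Spec_find_skew (genome : String) (out : List Int) : Prop := out = find_skew_alt genome
instance (genome : String) (out : List Int) : Decidable (Spec_find_skew genome out) := by unfold Spec_find_skew; infer_instance

-- ===== CLAIM =====
def Claim_equal_find_skew : Prop := ∀ (genome : String), Dom_find_skew genome → Spec_find_skew genome (find_skew genome)

-- ===== LEMMAS AND PROOFS =====
-- delta of one character
def find_skew_delta (c : Char) : Int := if c = 'G' then 1 else if c = 'C' then -1 else 0

-- canonical form: running sums
def find_skew_run (cs : List Char) (v : Int) : List Int :=
  match cs with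
  | [] => [v]
  | c :: cs => v :: find_skew_run cs (v + find_skew_delta c)

-- A's fold computes acc ++ run-values (shifted by one: run's head was already appended)
theorem find_skew_A_loop (cs : List Char) :
    ∀ (acc : List Int) (cC cG : Int),
    (cs.foldl find_skew_step (acc ++ [cG - cC], cC, cG)).1
      = acc ++ find_skew_run cs (cG - cC) := by
  induction cs with
  | nil => intro acc cC cG; simp [find_skew_run]
  | cons c cs ih =>
    intro acc cC cG
    have hd : (if c = 'G' then cG + 1 else cG) - (if c = 'C' then cC + 1 else cC)
        = (cG - cC) + find_skew_delta c := by
      simp only [find_skew_delta]; split_ifs with h1 h2 <;> simp_all <;> omega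
    simp only [List.foldl_cons, find_skew_step, find_skew_run]
    have := ih (acc ++ [cG - cC]) (if c = 'C' then cC + 1 else cC) (if c = 'G' then cG + 1 else cG)
    rw [hd] at this ⊢
    rw [this]
    simp

-- unfolding the events comprehension one character at a time
theorem find_skew_events_cons (c : Char) (cs : List Char) (k : Int) :
    find_skew_events (c :: cs) k
      = (if c = 'G' then [((k : Int), (1 : Int))] else if c = 'C' then [(k, -1)] else [])
        ++ find_skew_events cs (k + 1) := by
  simp only [find_skew_events, PySem.List.enumerate_cons, List.filterMap_cons]
  split_ifs <;> simp

-- B's event fold with pending plateau: invariant over a generalized start index k and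
-- pending-start p ≤ k, with the final block appended, yields acc ++ plateau ++ run.
theorem find_skew_B_loop (cs : List Char) :
    ∀ (k p v : Int) (acc : List Int), p ≤ k →
    ((find_skew_events cs k).foldl find_skew_fill (acc, v, p)).1
      ++ List.replicate
           (k + (cs.length : Int) + 1
             - ((find_skew_events cs k).foldl find_skew_fill (acc, v, p)).2.2).toNat
           ((find_skew_events cs k).foldl find_skew_fill (acc, v, p)).2.1
      = acc ++ List.replicate (k - p).toNat v ++ find_skew_run cs v := by
  induction cs with
  | nil =>
    intro k p v acc hpk
    have h1 : (k + (0 : Int) + 1 - p).toNat = (k - p).toNat + 1 := by omega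
    simp only [find_skew_events, PySem.List.enumerate_nil, List.filterMap_nil,
      List.foldl_nil, find_skew_run, List.length_nil, Int.natCast_zero, h1,
      List.replicate_succ', List.append_assoc]
  | cons c cs ih =>
    intro k p v acc hpk
    have h1 : (k + 1 - p).toNat = (k - p).toNat + 1 := by omega
    have hlen : (k + ((c :: cs).length : Int) + 1) = (k + 1) + (cs.length : Int) + 1 := by
      simp; ring
    rw [find_skew_events_cons, hlen]
    by_cases hG : c = 'G'
    · rw [if_pos hG]
      simp only [List.singleton_append, List.foldl_cons, find_skew_fill]
      have := ih (k + 1) (k + 1) (v + 1) (acc ++ List.replicate (k + 1 - p).toNat v) (le_refl _)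
      simp only [sub_self, Int.toNat_zero, List.replicate_zero, List.append_nil] at this
      rw [this]
      simp [find_skew_run, find_skew_delta, hG, h1, List.replicate_succ']
    · by_cases hC : c = 'C'
      · rw [if_neg hG, if_pos hC]
        simp only [List.singleton_append, List.foldl_cons, find_skew_fill]
        have := ih (k + 1) (k + 1) (v + -1) (acc ++ List.replicate (k + 1 - p).toNat v)
          (le_refl _)
        simp only [sub_self, Int.toNat_zero, List.replicate_zero, List.append_nil] at this
        rw [this]
        simp [find_skew_run, find_skew_delta, hC, h1, List.replicate_succ']
      · rw [if_neg hG, if_neg hC]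
        simp only [List.nil_append]
        rw [ih (k + 1) p v acc (by omega)]
        simp [find_skew_run, find_skew_delta, hG, hC, h1, List.replicate_succ']

-- ===== VERDICT =====
theorem find_skew_spec : Claim_equal_find_skew := by
  intro genome _
  unfold Spec_find_skew find_skew find_skew_alt
  have hA := find_skew_A_loop genome.toList [] 0 0
  have hB := find_skew_B_loop genome.toList 0 0 0 [] (le_refl _)
  simp only [List.nil_append, zero_add, sub_self, Int.toNat_zero,
    List.replicate_zero] at hA hB
  rw [hA]
  exact hB.symm
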